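-- pv_equiv track=rewrite | github.com/jogmrs/gerador-horario-escolar | gerador_horario_escolar.py | calcule_conflitos
-- ===== SOURCE A (Python) =====
-- def calcule_conflitos(disciplinas, matriculas):
--     emptySet = set()  # conjunto vazio
--
--     # Determina os conjuntos de disciplinas conflitantes a partir das
--     # matrículas individuais dos alunos nas disciplinas.
--     conflitos = [ emptySet for d in disciplinas ]
--     for a in matriculas.keys():
--         for d in range(len(disciplinas)):
--             if disciplinas[d] in matriculas[a]:
--                 conflitos[d] = conflitos[d] | matriculas[a]
--     return conflitos
-- ===== SOURCE B (Python) =====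
-- def calcule_conflitos(disciplinas, matriculas):
--     # One conflict set per distinct discipline name; each student touches only
--     # the disciplines they are enrolled in, instead of scanning all disciplines.
--     acc = {d: set() for d in disciplinas}
--     for alunos in matriculas.values():
--         for d in alunos:
--             if d in acc:
--                 acc[d] |= alunos
--     return [acc[d] for d in disciplinas]
-- ===== Notes on version B (the rewrite author's own statement) =====
-- stated objective: faster
-- what changed: Replaces the per-student scan over all disciplines with a dict keyed by discipline name: each student only touches their own enrolled disciplines, and duplicate discipline names share one accumulated set.
import Mathlib
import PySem

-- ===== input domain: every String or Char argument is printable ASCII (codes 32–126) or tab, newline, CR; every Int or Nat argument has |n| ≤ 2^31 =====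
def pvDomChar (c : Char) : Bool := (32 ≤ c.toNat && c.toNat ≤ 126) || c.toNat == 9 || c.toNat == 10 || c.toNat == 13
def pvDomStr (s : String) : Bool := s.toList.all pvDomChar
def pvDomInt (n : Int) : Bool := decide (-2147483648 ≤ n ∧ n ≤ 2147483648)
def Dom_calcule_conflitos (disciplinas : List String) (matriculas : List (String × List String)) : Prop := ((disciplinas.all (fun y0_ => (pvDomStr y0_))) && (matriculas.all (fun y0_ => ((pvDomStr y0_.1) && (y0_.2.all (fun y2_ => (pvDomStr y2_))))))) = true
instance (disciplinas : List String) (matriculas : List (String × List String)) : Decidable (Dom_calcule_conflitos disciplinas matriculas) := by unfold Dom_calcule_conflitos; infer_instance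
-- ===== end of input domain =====

-- B replaces A's per-student scan over ALL disciplines by a dict keyed by discipline
-- name, so each student only touches their own enrolled disciplines (objective: faster).
-- dict 'matriculas' is iterated as the association list of its (unique-keyed) items.

-- ===== PORT A =====
def calcule_conflitos (disciplinas : List String) (matriculas : List (String × List String)) : List (List String) :=
  -- conflitos = [ emptySet for d in disciplinas ]
  let conflitos : List (List String) := disciplinas.map (fun _ => PySem.Set.empty)
  -- for a in matriculas.keys(): for d in range(len(disciplinas)): …
  matriculas.foldl (fun conflitos a =>
    (PySem.List.pyRange 0 (PySem.List.len disciplinas) 1).foldl (fun conflitos d =>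
      if PySem.List.pyGetD disciplinas d "" ∈ a.2 then
        PySem.List.pySetD conflitos d
          (PySem.Set.union (PySem.List.pyGetD conflitos d PySem.Set.empty) (PySem.Set.ofList a.2))
      else conflitos) conflitos) conflitos

-- ===== PORT B =====
def calcule_conflitos_alt (disciplinas : List String) (matriculas : List (String × List String)) : List (List String) :=
  -- acc = {d: set() for d in disciplinas}
  let acc : PySem.Dict String (List String) :=
    disciplinas.foldl (fun acc d => acc.insert d PySem.Set.empty) PySem.Dict.empty
  -- for alunos in matriculas.values(): for d in alunos: if d in acc: acc[d] |= alunos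
  let acc := matriculas.foldl (fun acc p =>
    (PySem.Set.ofList p.2).foldl (fun acc d =>
      if acc.contains d then
        acc.modify d PySem.Set.empty (fun s => PySem.Set.union s (PySem.Set.ofList p.2))
      else acc) acc) acc
  -- return [acc[d] for d in disciplinas]
  disciplinas.map (fun d => acc.getD d PySem.Set.empty)

-- ===== PRECONDITION & SPEC =====
def Spec_calcule_conflitos (disciplinas : List String) (matriculas : List (String × List String)) (out : List (List String)) : Prop := out = calcule_conflitos_alt disciplinas matriculas
instance (disciplinas : List String) (matriculas : List (String × List String)) (out : List (List String)) : Decidable (Spec_calcule_conflitos disciplinas matriculas out) := by unfold Spec_calcule_conflitos; infer_instance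

-- ===== CLAIM (what is proved, stated in full; the proofs are below) =====
def Claim_equal_calcule_conflitos : Prop := ∀ (disciplinas : List String) (matriculas : List (String × List String)), Dom_calcule_conflitos disciplinas matriculas → Spec_calcule_conflitos disciplinas matriculas (calcule_conflitos disciplinas matriculas)

-- ===== LEMMAS AND PROOFS =====

-- the conflict set of a discipline named x: union of the enrollment sets of the
-- students enrolled in x, in student order
def pvF (x : String) (ms : List (String × List String)) (s0 : List String) : List String :=
  ms.foldl (fun s p => if x ∈ p.2 then PySem.Set.union s (PySem.Set.ofList p.2) else s) s0

-- pointwise effect of one student on g at name x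
def pvUpd (g : String → List String) (S : List String) (x : String) : List String :=
  if x ∈ S then PySem.Set.union (g x) (PySem.Set.ofList S) else g x

-- ---- A side ----

lemma innerA_gen (ds : List String) (S : List String) (g : String → List String) :
    ∀ (rest dpre : List String) (done : List (List String)),
      ds = dpre ++ rest → done.length = dpre.length →
      (List.range' dpre.length rest.length).foldl
        (fun L n => if ds.getD n "" ∈ S then
            L.set n (PySem.Set.union (L.getD n []) (PySem.Set.ofList S)) else L)
        (done ++ rest.map g)
      = done ++ rest.map (pvUpd g S) := by
  intro rest
  induction rest with
  | nil => intro dpre done _ _; simp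
  | cons x rest ih =>
    intro dpre done hds hlen
    have hget : ds.getD done.length "" = x := by
      rw [hlen]; subst hds
      simp [List.getD]
    have hgetL : (done ++ (x :: rest).map g).getD done.length [] = g x := by
      simp [List.getD]
    have hset : ∀ v, (done ++ (x :: rest).map g).set done.length v
        = (done ++ [v]) ++ rest.map g := by
      intro v
      rw [List.set_append_right _ _ (Nat.le_refl done.length)]
      simp
    rw [List.length_cons, List.range'_succ]
    simp only [List.foldl_cons]
    rw [← hlen, hget]
    have hbody : (if x ∈ S then
          (done ++ (x :: rest).map g).set done.length
            (PySem.Set.union ((done ++ (x :: rest).map g).getD done.length []) (PySem.Set.ofList S))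
        else done ++ (x :: rest).map g)
        = (done ++ [pvUpd g S x]) ++ rest.map g := by
      by_cases hx : x ∈ S
      · rw [if_pos hx, hgetL, hset]; simp [pvUpd, hx]
      · rw [if_neg hx]; simp [pvUpd, hx]
    rw [hbody]
    have h2 := ih (dpre ++ [x]) (done ++ [pvUpd g S x])
      (by simp [hds]) (by simp [hlen])
    simp only [List.length_append, List.length_nil, List.length_cons] at h2
    rw [hlen]
    simpa using h2

lemma innerA (ds S : List String) (g : String → List String) :
    (PySem.List.pyRange 0 (PySem.List.len ds) 1).foldl (fun L d =>
      if PySem.List.pyGetD ds d "" ∈ S then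
        PySem.List.pySetD L d
          (PySem.Set.union (PySem.List.pyGetD L d PySem.Set.empty) (PySem.Set.ofList S))
      else L) (ds.map g)
    = ds.map (pvUpd g S) := by
  have h0 := innerA_gen ds S g ds [] [] rfl rfl
  simp only [List.nil_append] at h0
  rw [PySem.List.len_eq, PySem.List.pyRange_zero_natCast ds.length, List.foldl_map]
  simp only [PySem.List.pyGetD_natCast, PySem.List.pySetD_natCast, PySem.Set.empty]
  rw [List.range_eq_range']
  exact h0

lemma outerA (ds : List String) :
    ∀ (ms : List (String × List String)) (g : String → List String),
      ms.foldl (fun conflitos a =>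
        (PySem.List.pyRange 0 (PySem.List.len ds) 1).foldl (fun conflitos d =>
          if PySem.List.pyGetD ds d "" ∈ a.2 then
            PySem.List.pySetD conflitos d
              (PySem.Set.union (PySem.List.pyGetD conflitos d PySem.Set.empty) (PySem.Set.ofList a.2))
          else conflitos) conflitos) (ds.map g)
      = ds.map (fun x => pvF x ms (g x)) := by
  intro ms
  induction ms with
  | nil => intro g; simp [pvF]
  | cons p ms ih =>
    intro g
    rw [List.foldl_cons, innerA ds p.2 g, ih (pvUpd g p.2)]
    simp [pvF, pvUpd]

-- ---- B side ----

-- initialisation: {d: set() for d in disciplinas}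
lemma initB_getD (x : String) : ∀ (ds : List String) (acc : PySem.Dict String (List String)),
    (ds.foldl (fun a d => a.insert d PySem.Set.empty) acc).getD x PySem.Set.empty
    = if x ∈ ds then [] else acc.getD x PySem.Set.empty := by
  intro ds
  induction ds with
  | nil => intro acc; simp
  | cons d ds ih =>
    intro acc
    rw [List.foldl_cons, ih]
    by_cases h1 : x ∈ ds
    · simp [h1]
    · by_cases h2 : x = d <;> simp [h1, h2, PySem.Dict.getD_insert, PySem.Set.empty]

lemma initB_contains (x : String) (ds : List String) :
    (ds.foldl (fun a d => a.insert d PySem.Set.empty)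
      (PySem.Dict.empty : PySem.Dict String (List String))).contains x = decide (x ∈ ds) := by
  have h := PySem.Dict.keys_foldl_insert (ν := List String) ds
    (fun _ _ => PySem.Set.empty) PySem.Dict.empty
  have hk : ((ds.foldl (fun a d => a.insert d PySem.Set.empty)
      (PySem.Dict.empty : PySem.Dict String (List String))).contains x = true) ↔ x ∈ ds := by
    rw [PySem.Dict.contains_iff_mem_keys, h, PySem.Set.mem_update]
    simp [PySem.Dict.keys_empty]
  by_cases hx : x ∈ ds
  · rw [decide_eq_true hx]; exact hk.2 hx
  · have hne : ¬ ((ds.foldl (fun a d => a.insert d PySem.Set.empty)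
        (PySem.Dict.empty : PySem.Dict String (List String))).contains x = true) :=
      fun hc => hx (hk.1 hc)
    simp only [Bool.not_eq_true] at hne
    rw [decide_eq_false hx]; exact hne

-- one student's inner loop: contains is unchanged
lemma innerB_contains (S0 : List String) (x : String) :
    ∀ (xs : List String) (acc : PySem.Dict String (List String)),
      (xs.foldl (fun a d => if a.contains d then
          a.modify d PySem.Set.empty (fun s => PySem.Set.union s (PySem.Set.ofList S0)) else a) acc).contains x
      = acc.contains x := by
  intro xs
  induction xs with
  | nil => intro acc; rfl
  | cons d xs ih =>
    intro acc
    rw [List.foldl_cons]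
    by_cases hc : acc.contains d
    · rw [if_pos hc, ih, PySem.Dict.contains_modify]
      by_cases hx : x = d
      · subst hx; simp [hc]
      · simp [hx]
    · rw [if_neg hc, ih]

-- one student's inner loop: effect on getD at x
lemma innerB_getD (S0 : List String) (x : String) :
    ∀ (xs : List String), xs.Nodup →
      ∀ (acc : PySem.Dict String (List String)),
      (xs.foldl (fun a d => if a.contains d then
          a.modify d PySem.Set.empty (fun s => PySem.Set.union s (PySem.Set.ofList S0)) else a) acc).getD x PySem.Set.empty
      = if x ∈ xs ∧ acc.contains x then
          PySem.Set.union (acc.getD x PySem.Set.empty) (PySem.Set.ofList S0)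
        else acc.getD x PySem.Set.empty := by
  intro xs
  induction xs with
  | nil => intro _ acc; simp
  | cons d xs ih =>
    intro hnd acc
    have hdnot : d ∉ xs := (List.nodup_cons.1 hnd).1
    rw [List.foldl_cons, ih (List.nodup_cons.1 hnd).2]
    by_cases hc : acc.contains d
    · rw [if_pos hc]
      by_cases hx : x = d
      · subst hx
        have hxn : x ∉ xs := hdnot
        simp [hxn, PySem.Dict.contains_modify, hc, PySem.Dict.getD_modify_self]
      · rw [PySem.Dict.getD_modify_of_ne _ _ _ hx, PySem.Dict.contains_modify]
        by_cases hmem : x ∈ xs <;> simp [hmem, hx]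
    · rw [if_neg hc]
      by_cases hx : x = d
      · subst hx
        have hxn : x ∉ xs := hdnot
        simp [hxn, hc]
      · by_cases hmem : x ∈ xs <;> simp [hmem, hx]

-- whole student loop: getD at x accumulates pvF when x is a key, else is untouched
lemma outerB (x : String) :
    ∀ (ms : List (String × List String)) (acc : PySem.Dict String (List String)),
      (ms.foldl (fun acc p =>
        (PySem.Set.ofList p.2).foldl (fun acc d =>
          if acc.contains d then
            acc.modify d PySem.Set.empty (fun s => PySem.Set.union s (PySem.Set.ofList p.2))
          else acc) acc) acc).getD x PySem.Set.empty
      = if acc.contains x then pvF x ms (acc.getD x PySem.Set.empty)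
        else acc.getD x PySem.Set.empty := by
  intro ms
  induction ms with
  | nil => intro acc; simp [pvF]
  | cons p ms ih =>
    intro acc
    rw [List.foldl_cons, ih, innerB_contains, innerB_getD p.2 x _ (PySem.Set.nodup_ofList p.2)]
    by_cases hc : acc.contains x
    · rw [if_pos hc, if_pos hc]
      by_cases hm : x ∈ p.2
      · have hm' : x ∈ PySem.Set.ofList p.2 := (PySem.Set.mem_ofList _ _).2 hm
        simp [hm', hc, pvF, hm]
      · have hm' : x ∉ PySem.Set.ofList p.2 := fun h => hm ((PySem.Set.mem_ofList _ _).1 h)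
        simp [hm', hc, pvF, hm]
    · simp [hc]

-- ===== VERDICT (by name: the statement is the Claim_ definition above) =====
theorem calcule_conflitos_spec : Claim_equal_calcule_conflitos := by
  intro ds ms _
  show calcule_conflitos ds ms = calcule_conflitos_alt ds ms
  unfold calcule_conflitos calcule_conflitos_alt
  rw [outerA ds ms (fun _ => PySem.Set.empty)]
  apply List.map_congr_left
  intro x hx
  rw [outerB x ms _, initB_contains x ds, initB_getD x ds PySem.Dict.empty]
  simp [hx, PySem.Set.empty]
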